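-- pv_equiv track=rewrite | github.com/idiap/hallucination-detection | bart_gbp_scores.py | segment_by_alignment
-- ===== SOURCE A (Python) =====
-- SENT_SEP_TOKEN = '.'
--
-- def segment_by_alignment(tokens, alignments, sentence_separator_token=SENT_SEP_TOKEN):
--     """ Creates segments from alignments. Unaligned tokens and sentence separators are individual segments. """
--     segments = []
--     is_aligned = []
--     cur_segment = []
--     prev_aligned_pos = -10
--     for token, aligned_pos in zip(tokens, alignments):
--         if aligned_pos == -1 or token == sentence_separator_token:
--             if cur_segment:
--                 segments.append(cur_segment)
--                 cur_segment = []
--             segments.append([token])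
--             is_aligned.append(0)
--             prev_aligned_pos = -1
--         elif aligned_pos == prev_aligned_pos + 1:
--             # continue current segment
--             cur_segment.append(token)
--             prev_aligned_pos = aligned_pos
--         else:
--             # end current segment and start a new one
--             if cur_segment:
--                 segments.append(cur_segment)
--             cur_segment = [token]
--             prev_aligned_pos = aligned_pos
--             is_aligned.append(1)
--
--     if cur_segment:
--         segments.append(cur_segment)
--     return segments, is_aligned
-- ===== SOURCE B (Python) =====
-- SENT_SEP_TOKEN = '.'
--
-- def segment_by_alignment(tokens, alignments, sentence_separator_token=SENT_SEP_TOKEN):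
--     """Run-extraction version: find each maximal continuous run in one inner scan,
--     emit it as a segment, and record the flag events on the run boundaries."""
--     pairs = list(zip(tokens, alignments))
--     n = len(pairs)
--     segments, is_aligned = [], []
--     prev = -10
--     i = 0
--     while i < n:
--         tok, pos = pairs[i]
--         if pos == -1 or tok == sentence_separator_token:
--             segments.append([tok])
--             is_aligned.append(0)
--             prev = -1
--             i += 1
--         else:
--             if pos != prev + 1:
--                 is_aligned.append(1)
--             last = pos
--             j = i + 1
--             while (j < n and pairs[j][1] == last + 1 and pairs[j][1] != -1
--                    and pairs[j][0] != sentence_separator_token):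
--                 last = pairs[j][1]
--                 j += 1
--             segments.append([t for t, _ in pairs[i:j]])
--             prev = last
--             i = j
--     return segments, is_aligned
-- ===== Notes on version B (the rewrite author's own statement) =====
-- stated objective: alternative
-- what changed: A grows a current-segment accumulator element by element inside one fold; B is a two-level loop that, at each segment start, extracts the whole maximal continuous run with an inner scan and emits it as one segment, recording flag events only at run boundaries.
import Mathlib
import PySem

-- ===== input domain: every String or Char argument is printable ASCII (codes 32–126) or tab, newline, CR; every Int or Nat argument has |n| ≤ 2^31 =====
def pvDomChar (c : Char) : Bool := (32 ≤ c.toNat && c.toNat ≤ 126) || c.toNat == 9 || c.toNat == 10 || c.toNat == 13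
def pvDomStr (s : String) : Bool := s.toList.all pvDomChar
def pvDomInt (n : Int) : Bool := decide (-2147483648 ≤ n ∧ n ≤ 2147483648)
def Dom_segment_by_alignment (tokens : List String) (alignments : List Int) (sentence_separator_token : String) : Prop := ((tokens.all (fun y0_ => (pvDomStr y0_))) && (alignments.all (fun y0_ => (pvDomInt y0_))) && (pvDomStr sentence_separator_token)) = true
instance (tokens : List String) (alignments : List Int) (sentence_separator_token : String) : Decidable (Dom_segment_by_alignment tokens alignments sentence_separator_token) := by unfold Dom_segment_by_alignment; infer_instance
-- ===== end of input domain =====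

-- B re-decomposes A's accumulator fold as run extraction: each maximal continuous run is
-- found by one inner scan and emitted as a whole segment (objective: alternative, same cost).

-- ===== PORT A =====
-- state: (segments, is_aligned, cur_segment, prev_aligned_pos)
def stepA (sep : String) (st : List (List String) × List Int × List String × Int) (p : String × Int) : List (List String) × List Int × List String × Int :=
  match st, p with
  | (segs, isal, cur, prev), (tok, pos) =>
    if pos = -1 ∨ tok = sep then
      ((if cur = [] then segs else segs ++ [cur]) ++ [[tok]], isal ++ [0], [], -1)
    else if pos = prev + 1 then
      (segs, isal, cur ++ [tok], pos)
    else
      ((if cur = [] then segs else segs ++ [cur]), isal ++ [1], [tok], pos)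

def segment_by_alignment (tokens : List String) (alignments : List Int) (sentence_separator_token : String) : List (List String) × List Int :=
  let st := (tokens.zip alignments).foldl (stepA sentence_separator_token) ([], [], [], -10)
  ((if st.2.2.1 = [] then st.1 else st.1 ++ [st.2.2.1]), st.2.1)

-- ===== PORT B =====
-- inner while loop of Source B: extend the run while the next pair continues it;
-- returns (tokens taken, last aligned position, remaining pairs)
def takeRun (sep : String) : Int → List (String × Int) → List String × Int × List (String × Int)
  | p, [] => ([], p, [])
  | p, (t, a) :: rest =>
    if a = p + 1 ∧ a ≠ -1 ∧ t ≠ sep then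
      let r := takeRun sep a rest
      (t :: r.1, r.2)
    else ([], p, (t, a) :: rest)

theorem takeRun_len (sep : String) (p : Int) (l : List (String × Int)) :
    (takeRun sep p l).2.2.length ≤ l.length := by
  induction l generalizing p with
  | nil => simp [takeRun]
  | cons x rest ih =>
    obtain ⟨t, a⟩ := x
    simp only [takeRun]
    split
    · exact le_trans (ih a) (by simp)
    · simp

-- outer while loop of Source B
def goB (sep : String) : Int → List (String × Int) → List (List String) × List Int
  | _, [] => ([], [])
  | prev, (t, a) :: rest =>
    if a = -1 ∨ t = sep then
      let r := goB sep (-1) rest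
      ([t] :: r.1, 0 :: r.2)
    else
      let tr := takeRun sep a rest
      let r := goB sep tr.2.1 tr.2.2
      ((t :: tr.1) :: r.1, if a = prev + 1 then r.2 else 1 :: r.2)
termination_by _ l => l.length
decreasing_by
  · simp
  · have := takeRun_len sep a rest
    simp only [List.length_cons]
    omega

def segment_by_alignment_alt (tokens : List String) (alignments : List Int) (sentence_separator_token : String) : List (List String) × List Int :=
  goB sentence_separator_token (-10) (tokens.zip alignments)

-- ===== PRECONDITION & SPEC =====
def Spec_segment_by_alignment (tokens : List String) (alignments : List Int) (sentence_separator_token : String) (out : List (List String) × List Int) : Prop := out = segment_by_alignment_alt tokens alignments sentence_separator_token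
instance (tokens : List String) (alignments : List Int) (sentence_separator_token : String) (out : List (List String) × List Int) : Decidable (Spec_segment_by_alignment tokens alignments sentence_separator_token out) := by unfold Spec_segment_by_alignment; infer_instance

-- ===== CLAIM (what is proved, stated in full; the proofs are below) =====
def Claim_equal_segment_by_alignment : Prop := ∀ (tokens : List String) (alignments : List Int) (sentence_separator_token : String), Dom_segment_by_alignment tokens alignments sentence_separator_token → Spec_segment_by_alignment tokens alignments sentence_separator_token (segment_by_alignment tokens alignments sentence_separator_token)

-- ===== LEMMAS AND PROOFS =====

-- A's final step, as a helper for the invariant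
def finA (st : List (List String) × List Int × List String × Int) : List (List String) × List Int :=
  ((if st.2.2.1 = [] then st.1 else st.1 ++ [st.2.2.1]), st.2.1)

-- goB unfolded on a cons (equation lemma in rewrite-friendly form)
theorem goB_cons (sep t : String) (a prev : Int) (rest : List (String × Int)) :
    goB sep prev ((t, a) :: rest) =
      if a = -1 ∨ t = sep then ([t] :: (goB sep (-1) rest).1, 0 :: (goB sep (-1) rest).2)
      else ((t :: (takeRun sep a rest).1) ::
              (goB sep (takeRun sep a rest).2.1 (takeRun sep a rest).2.2).1,
            if a = prev + 1 then (goB sep (takeRun sep a rest).2.1 (takeRun sep a rest).2.2).2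
            else 1 :: (goB sep (takeRun sep a rest).2.1 (takeRun sep a rest).2.2).2) := by
  rw [goB]

-- takeRun unfolded on a cons
theorem takeRun_cons (sep t : String) (a p : Int) (rest : List (String × Int)) :
    takeRun sep p ((t, a) :: rest) =
      if a = p + 1 ∧ a ≠ -1 ∧ t ≠ sep then
        (t :: (takeRun sep a rest).1, (takeRun sep a rest).2)
      else ([], p, (t, a) :: rest) := by
  rw [takeRun]

-- Invariant: A's fold from an arbitrary state equals B's run decomposition of the rest.
theorem foldA_eq_goB (sep : String) (l : List (String × Int)) :
    ∀ (prev : Int) (segs : List (List String)) (isal : List Int) (cur : List String),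
    finA (l.foldl (stepA sep) (segs, isal, cur, prev)) =
      if cur = [] then
        (segs ++ (goB sep prev l).1, isal ++ (goB sep prev l).2)
      else
        (segs ++ (cur ++ (takeRun sep prev l).1) ::
            (goB sep (takeRun sep prev l).2.1 (takeRun sep prev l).2.2).1,
         isal ++ (goB sep (takeRun sep prev l).2.1 (takeRun sep prev l).2.2).2) := by
  induction l with
  | nil =>
    intro prev segs isal cur
    by_cases h : cur = [] <;> simp [h, finA, goB, takeRun]
  | cons x rest ih =>
    intro prev segs isal cur
    obtain ⟨t, a⟩ := x
    rw [List.foldl_cons]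
    by_cases h1 : a = -1 ∨ t = sep
    · have hc : ¬(a = prev + 1 ∧ a ≠ -1 ∧ t ≠ sep) := by tauto
      show finA (List.foldl (stepA sep) (stepA sep (segs, isal, cur, prev) (t, a)) rest) = _
      simp only [stepA]
      rw [if_pos h1, ih (-1) _ _ [], if_pos rfl]
      by_cases h : cur = []
      · rw [if_pos h, goB_cons, if_pos h1]
        simp [h]
      · rw [if_neg h, takeRun_cons, if_neg hc, goB_cons, if_pos h1]
        simp [h]
    · obtain ⟨ha1, ht⟩ := not_or.mp h1
      have h1' : ¬(a = -1 ∨ t = sep) := by tauto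
      show finA (List.foldl (stepA sep) (stepA sep (segs, isal, cur, prev) (t, a)) rest) = _
      simp only [stepA]
      rw [if_neg h1']
      by_cases h2 : a = prev + 1
      · rw [if_pos h2, ih a _ _ (cur ++ [t]), if_neg (by simp)]
        by_cases h : cur = []
        · rw [if_pos h, goB_cons, if_neg h1', if_pos h2]
          simp [h]
        · rw [if_neg h, takeRun_cons, if_pos ⟨h2, ha1, ht⟩]
          simp
      · have hc : ¬(a = prev + 1 ∧ a ≠ -1 ∧ t ≠ sep) := by tauto
        rw [if_neg h2, ih a _ _ [t], if_neg (by simp)]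
        by_cases h : cur = []
        · rw [if_pos h, goB_cons, if_neg h1', if_neg h2]
          simp [h]
        · rw [if_neg h, takeRun_cons, if_neg hc, goB_cons, if_neg h1', if_neg h2]
          simp [h]

theorem segment_by_alignment_spec : Claim_equal_segment_by_alignment := by
  intro tokens alignments sep _
  unfold Spec_segment_by_alignment segment_by_alignment segment_by_alignment_alt
  have h := foldA_eq_goB sep (tokens.zip alignments) (-10) [] [] []
  rw [if_pos rfl] at h
  simpa [finA] using h
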